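-- pv_equiv track=rewrite | github.com/PedroLauand/Entropic_Inflation_tests | Current Code/shannon_tests/shannon_applications/dag.py | _normalize_child_dag
-- ===== SOURCE A (Python) =====
-- from typing import Dict, List, Mapping, Sequence
--
-- def _normalize_child_dag(dag: Mapping[str, Sequence[str]]) -> Dict[str, List[str]]:
--     normalized: Dict[str, List[str]] = {}
--     all_nodes = set()
--
--     for raw_parent, raw_children in dag.items():
--         parent = str(raw_parent).strip()
--         if not parent:
--             raise ValueError("dag contains an empty node name")
--         if parent in normalized:
--             raise ValueError(f"dag contains duplicate node '{parent}'")
--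
--         children: List[str] = []
--         seen_children = set()
--         for raw_child in raw_children:
--             child = str(raw_child).strip()
--             if not child:
--                 raise ValueError(f"dag for '{parent}' contains an empty child name")
--             if child == parent:
--                 raise ValueError(f"node '{parent}' cannot point to itself")
--             if child in seen_children:
--                 raise ValueError(f"dag for '{parent}' contains duplicate children")
--             seen_children.add(child)
--             children.append(child)
--             all_nodes.add(child)
--
--         normalized[parent] = children
--         all_nodes.add(parent)
--
--     for node in sorted(all_nodes):
--         normalized.setdefault(node, [])
--
--     _check_acyclic(sorted(normalized), normalized)
--     return normalized
--
-- def _check_acyclic(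
--     nodes: Sequence[str],
--     children_map: Mapping[str, Sequence[str]],
-- ) -> None:
--     visit_state = {node: 0 for node in nodes}
--
--     def visit(node: str) -> None:
--         state = visit_state[node]
--         if state == 1:
--             raise ValueError("dag must be acyclic")
--         if state == 2:
--             return
--
--         visit_state[node] = 1
--         for child in children_map[node]:
--             visit(child)
--         visit_state[node] = 2
--
--     for node in nodes:
--         visit(node)
-- ===== SOURCE B (Python) =====
-- def _normalize_child_dag(dag):
--     normalized = {}
--     for raw_parent, raw_children in dag.items():
--         parent = str(raw_parent).strip()
--         children = [str(raw_child).strip() for raw_child in raw_children]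
--         if not parent:
--             raise ValueError("dag contains an empty node name")
--         if parent in normalized:
--             raise ValueError(f"dag contains duplicate node '{parent}'")
--         if any(not child for child in children):
--             raise ValueError(f"dag for '{parent}' contains an empty child name")
--         if parent in children:
--             raise ValueError(f"node '{parent}' cannot point to itself")
--         if len(set(children)) != len(children):
--             raise ValueError(f"dag for '{parent}' contains duplicate children")
--         normalized[parent] = children
--     extra = {c for kids in normalized.values() for c in kids} - normalized.keys()
--     for node in sorted(extra):
--         normalized[node] = []
--     # acyclicity by iterated elimination of nodes whose children are all gone
--     remaining = list(normalized)
--     while True: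
--         kept = [n for n in remaining if any(c in remaining for c in normalized[n])]
--         if len(kept) == len(remaining):
--             break
--         remaining = kept
--     if remaining:
--         raise ValueError("dag must be acyclic")
--     return normalized
-- ===== Notes on version B (the rewrite author's own statement) =====
-- stated objective: alternative
-- what changed: B validates each entry with bulk checks (any/membership/set-size) instead of A's per-child loop with a seen-set, fills the missing nodes from a computed children-minus-keys set difference instead of setdefault over all sorted nodes, and replaces A's recursive three-colour DFS cycle check by an iterated elimination loop that repeatedly drops nodes all of whose children are already dropped and raises if anything remains.
import Mathlib
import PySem

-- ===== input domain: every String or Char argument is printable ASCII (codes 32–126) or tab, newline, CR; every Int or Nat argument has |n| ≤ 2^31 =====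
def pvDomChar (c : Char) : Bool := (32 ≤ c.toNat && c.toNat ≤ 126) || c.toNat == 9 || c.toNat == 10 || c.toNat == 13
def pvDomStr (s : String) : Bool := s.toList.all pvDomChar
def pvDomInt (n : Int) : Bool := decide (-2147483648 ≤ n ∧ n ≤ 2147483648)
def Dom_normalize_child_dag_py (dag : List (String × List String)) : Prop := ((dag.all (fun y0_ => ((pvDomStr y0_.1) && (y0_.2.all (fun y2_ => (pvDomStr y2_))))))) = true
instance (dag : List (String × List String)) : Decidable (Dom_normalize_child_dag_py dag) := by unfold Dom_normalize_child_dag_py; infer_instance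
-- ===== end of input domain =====

-- B restructures the validation with bulk any/membership/set-size checks and replaces A's
-- recursive DFS acyclicity check by iterated elimination of nodes whose children are all
-- eliminated (alternative algorithm, same return value on all accepted inputs).


-- ===== PORT A =====
-- inner loop over raw_children; state = (children, seen_children, all_nodes); none = ValueError
def childLoopA (parent : String) :
    List String → List String × PySem.Set String × PySem.Set String →
    Option (List String × PySem.Set String × PySem.Set String)
  | [], st => some st
  | rawChild :: rest, (children, seen, allNodes) =>
    let child := PySem.Str.strip rawChild
    if child = "" then none
    else if child = parent then none
    else if PySem.Set.contains seen child then none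
    else childLoopA parent rest
      (children ++ [child], PySem.Set.add seen child, PySem.Set.add allNodes child)

-- outer loop over dag.items(); state = (normalized, all_nodes)
def normLoopA :
    List (String × List String) → PySem.Dict String (List String) × PySem.Set String →
    Option (PySem.Dict String (List String) × PySem.Set String)
  | [], st => some st
  | (rawParent, rawChildren) :: rest, (normalized, allNodes) =>
    let parent := PySem.Str.strip rawParent
    if parent = "" then none
    else if normalized.contains parent then none
    else
      match childLoopA parent rawChildren ([], PySem.Set.empty, allNodes) with
      | none => none
      | some (children, _, allNodes') =>
        normLoopA rest (normalized.insert parent children, PySem.Set.add allNodes' parent)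

-- _check_acyclic's recursive visit; fuel only makes Python's unbounded recursion structural
-- (under Pre_ the fuel passed below is proved never to run out); none = ValueError/KeyError
mutual
def visitA (cm : PySem.Dict String (List String)) :
    Nat → PySem.Dict String Int → String → Option (PySem.Dict String Int)
  | 0, _, _ => none
  | fuel + 1, st, node =>
    match st.get? node with
    | none => none
    | some s =>
      if s = 1 then none
      else if s = 2 then some st
      else
        match cm.get? node with
        | none => none
        | some cs =>
          match visitChildrenA cm fuel (st.insert node 1) cs with
          | none => none
          | some st' => some (st'.insert node 2)
termination_by fuel _ _ => (fuel, 0)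
def visitChildrenA (cm : PySem.Dict String (List String)) :
    Nat → PySem.Dict String Int → List String → Option (PySem.Dict String Int)
  | _, st, [] => some st
  | fuel, st, c :: rest =>
    match visitA cm fuel st c with
    | none => none
    | some st' => visitChildrenA cm fuel st' rest
termination_by fuel _ cs => (fuel, cs.length + 1)
end

-- the 'for node in nodes: visit(node)' loop of _check_acyclic
def checkLoopA (cm : PySem.Dict String (List String)) (fuel : Nat) :
    List String → PySem.Dict String Int → Option (PySem.Dict String Int)
  | [], st => some st
  | n :: rest, st =>
    match visitA cm fuel st n with
    | none => none
    | some st' => checkLoopA cm fuel rest st'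

def coreA (dag : List (String × List String)) : Option (List (String × List String)) :=
  match normLoopA dag (PySem.Dict.empty, PySem.Set.empty) with
  | none => none
  | some (normalized, allNodes) =>
    -- for node in sorted(all_nodes): normalized.setdefault(node, [])
    let normalized :=
      (PySem.List.sorted allNodes (fun x => x) false).foldl
        (fun d n => d.setdefault n []) normalized
    -- _check_acyclic(sorted(normalized), normalized)
    let nodes := PySem.List.sorted normalized.keys (fun x => x) false
    let st0 := nodes.foldl (fun d n => d.insert n (0 : Int)) PySem.Dict.empty
    match checkLoopA normalized (nodes.length + 1) nodes st0 with
    | none => none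
    | some _ => some normalized.items

def normalize_child_dag_py (dag : List (String × List String)) : List (String × List String) :=
  (coreA dag).getD []

-- ===== PORT B =====
-- validation loop of Source B: bulk checks per entry; none = ValueError
def normLoopB :
    List (String × List String) → PySem.Dict String (List String) →
    Option (PySem.Dict String (List String))
  | [], d => some d
  | (rawParent, rawChildren) :: rest, d =>
    let parent := PySem.Str.strip rawParent
    let children := rawChildren.map PySem.Str.strip
    if parent = "" then none
    else if d.contains parent then none
    else if children.any (fun c => c = "") then none
    else if children.contains parent then none
    else if PySem.Set.len (PySem.Set.ofList children) ≠ PySem.List.len children then none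
    else normLoopB rest (d.insert parent children)

-- kept = [n for n in remaining if any(c in remaining for c in normalized[n])];
-- normalized[n] is read with getD [] — n is always a key of cm (remaining only ever
-- shrinks from cm's key list), so Python's lookup cannot raise here
def keepB (cm : PySem.Dict String (List String)) (remaining : List String) : List String :=
  remaining.filter (fun n => (cm.getD n []).any (fun c => remaining.contains c))

-- Source B's 'while True' elimination loop
def peelB (cm : PySem.Dict String (List String)) (remaining : List String) : List String :=
  let kept := keepB cm remaining
  if kept.length = remaining.length then remaining else peelB cm kept
termination_by remaining.length
decreasing_by
  have hle : (keepB cm remaining).length ≤ remaining.length := List.length_filter_le _ _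
  have hk : kept.length = (keepB cm remaining).length := rfl
  omega

def coreB (dag : List (String × List String)) : Option (List (String × List String)) :=
  match normLoopB dag PySem.Dict.empty with
  | none => none
  | some normalized =>
    let extra := PySem.Set.diff (PySem.Set.ofList (normalized.values.flatMap id)) normalized.keys
    let normalized :=
      (PySem.List.sorted extra (fun x => x) false).foldl (fun d n => d.insert n []) normalized
    let remaining := peelB normalized normalized.keys
    if remaining.isEmpty then some normalized.items else none

def normalize_child_dag_py_alt (dag : List (String × List String)) : List (String × List String) :=
  (coreB dag).getD []

-- ===== PRECONDITION & SPEC =====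
-- the dag with every name stripped, as A and B normalize it
def pvStripped (dag : List (String × List String)) : List (String × List String) :=
  dag.map (fun pr => (PySem.Str.strip pr.1, pr.2.map PySem.Str.strip))

-- children of a node in the normalized graph (first matching entry; [] for non-parents)
def pvChildren (g : List (String × List String)) (x : String) : List String :=
  ((g.find? (fun pr => pr.1 == x)).map Prod.snd).getD []

def pvNodesF (g : List (String × List String)) : Finset String :=
  (g.flatMap (fun pr => pr.1 :: pr.2)).toFinset

def pvExpand (g : List (String × List String)) (F : Finset String) : Finset String :=
  F ∪ F.biUnion (fun x => (pvChildren g x).toFinset)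

-- all nodes reachable from x by one or more edges (the expansion stabilizes within card steps)
def pvDesc (g : List (String × List String)) (x : String) : Finset String :=
  (pvExpand g)^[(pvNodesF g).card] (pvChildren g x).toFinset

-- Pre_ excludes exactly the inputs on which A raises ValueError: an empty name after
-- stripping, duplicate (stripped) parent names, a self-loop or duplicate children in one
-- entry, and any directed cycle (no node may reach itself).
def Pre_normalize_child_dag_py (dag : List (String × List String)) : Prop :=
  (∀ pr ∈ pvStripped dag, pr.1 ≠ "" ∧ "" ∉ pr.2 ∧ pr.1 ∉ pr.2 ∧ pr.2.Nodup) ∧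
  ((pvStripped dag).map Prod.fst).Nodup ∧
  (∀ x ∈ pvNodesF (pvStripped dag), x ∉ pvDesc (pvStripped dag) x)
instance (dag : List (String × List String)) : Decidable (Pre_normalize_child_dag_py dag) := by
  unfold Pre_normalize_child_dag_py; infer_instance

def pvWitness_normalize_child_dag_py : (List (String × List String)) :=
  [("a", ["b"]), ("b", [])]

def Spec_normalize_child_dag_py (dag : List (String × List String)) (out : List (String × List String)) : Prop := out = normalize_child_dag_py_alt dag
instance (dag : List (String × List String)) (out : List (String × List String)) : Decidable (Spec_normalize_child_dag_py dag out) := by unfold Spec_normalize_child_dag_py; infer_instance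

-- ===== CLAIM (what is proved, stated in full; the proofs are below) =====
def Claim_equal_normalize_child_dag_py : Prop := ∀ (dag : List (String × List String)), Dom_normalize_child_dag_py dag → Pre_normalize_child_dag_py dag → Spec_normalize_child_dag_py dag (normalize_child_dag_py dag)

-- ===== LEMMAS AND PROOFS =====

-- the entry map applied by both normalization loops
def pvStripPair (pr : String × List String) : String × List String :=
  (PySem.Str.strip pr.1, pr.2.map PySem.Str.strip)

-- A's all_nodes insertion order: per entry, children first, then the parent
def pvAllList (g : List (String × List String)) : List String :=
  g.flatMap (fun pr => pr.2 ++ [pr.1])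

-- the normalized dict before the setdefault fill, shared by both loops
def pvBase (g : List (String × List String)) : PySem.Dict String (List String) :=
  g.foldl (fun d pr => d.insert pr.1 pr.2) PySem.Dict.empty

-- ---- phase 1: both validation loops succeed and build pvBase ----

theorem pv_childLoopA_ok (parent : String) :
    ∀ (rcs : List String) (ch : List String) (seen allN : PySem.Set String),
      "" ∉ rcs.map PySem.Str.strip → parent ∉ rcs.map PySem.Str.strip →
      (rcs.map PySem.Str.strip).Nodup →
      (∀ c ∈ rcs.map PySem.Str.strip, c ∉ seen) →
      childLoopA parent rcs (ch, seen, allN) =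
        some (ch ++ rcs.map PySem.Str.strip,
              PySem.Set.update seen (rcs.map PySem.Str.strip),
              PySem.Set.update allN (rcs.map PySem.Str.strip)) := by
  intro rcs
  induction rcs with
  | nil => intro ch seen allN _ _ _ _; simp [childLoopA, PySem.Set.update_nil]
  | cons rc rest ih =>
    intro ch seen allN hemp hpar hnd hseen
    simp only [List.map_cons, List.mem_cons, not_or] at hemp hpar
    have hne : PySem.Str.strip rc ≠ "" := fun h => hemp.1 h.symm
    have hnp : PySem.Str.strip rc ≠ parent := fun h => hpar.1 h.symm
    have hns : PySem.Set.contains seen (PySem.Str.strip rc) = false := by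
      rw [Bool.eq_false_iff]
      intro h
      exact hseen _ (by simp) ((PySem.Set.contains_iff _ _).mp h)
    rw [childLoopA, if_neg hne, if_neg hnp, hns]
    simp only [Bool.false_eq_true, if_false]
    have hnd' : (rest.map PySem.Str.strip).Nodup := (List.nodup_cons.mp hnd).2
    have hmem : PySem.Str.strip rc ∉ rest.map PySem.Str.strip := (List.nodup_cons.mp hnd).1
    rw [ih (ch ++ [PySem.Str.strip rc]) (PySem.Set.add seen (PySem.Str.strip rc))
        (PySem.Set.add allN (PySem.Str.strip rc)) hemp.2 hpar.2 hnd' ?_]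
    · simp only [List.map_cons, List.append_assoc, List.singleton_append,
        PySem.Set.update_cons]
    · intro c hc hcin
      rcases (PySem.Set.mem_add _ _ _).mp hcin with h | h
      · exact hseen c (by simp [hc]) h
      · exact hmem (h ▸ hc)

theorem pv_normLoopA_ok :
    ∀ (l : List (String × List String)) (d : PySem.Dict String (List String))
      (s : PySem.Set String),
      (∀ pr ∈ l.map pvStripPair, pr.1 ≠ "" ∧ "" ∉ pr.2 ∧ pr.1 ∉ pr.2 ∧ pr.2.Nodup) →
      ((l.map pvStripPair).map Prod.fst).Nodup →
      (∀ pr ∈ l.map pvStripPair, d.contains pr.1 = false) →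
      normLoopA l (d, s) =
        some ((l.map pvStripPair).foldl (fun d pr => d.insert pr.1 pr.2) d,
              PySem.Set.update s (pvAllList (l.map pvStripPair))) := by
  intro l
  induction l with
  | nil => intro d s _ _ _; simp [normLoopA, pvAllList, PySem.Set.update_nil]
  | cons pr rest ih =>
    obtain ⟨rp, rcs⟩ := pr
    intro d s hval hnd hcon
    have hv0 := hval (pvStripPair (rp, rcs)) (by simp)
    obtain ⟨hne, hemp, hself, hcnd⟩ := hv0
    simp only [pvStripPair] at hne hemp hself hcnd
    have hc0 : d.contains (PySem.Str.strip rp) = false :=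
      hcon (pvStripPair (rp, rcs)) (by simp)
    rw [normLoopA, if_neg hne, hc0]
    simp only [Bool.false_eq_true, if_false]
    rw [pv_childLoopA_ok (PySem.Str.strip rp) rcs [] PySem.Set.empty s hemp hself hcnd
      (by intro c _ hc; simp [PySem.Set.empty] at hc)]
    have hnd2 : (PySem.Str.strip rp :: (rest.map pvStripPair).map Prod.fst).Nodup := by
      simpa [pvStripPair] using hnd
    have hnd' := (List.nodup_cons.mp hnd2).2
    have hfst : PySem.Str.strip rp ∉ (rest.map pvStripPair).map Prod.fst :=
      (List.nodup_cons.mp hnd2).1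
    simp only [List.nil_append]
    rw [ih (d.insert (PySem.Str.strip rp) (rcs.map PySem.Str.strip))
        (PySem.Set.add (PySem.Set.update s (rcs.map PySem.Str.strip)) (PySem.Str.strip rp))
        (fun pr hpr => hval pr (by simp; right; simpa using hpr)) hnd'
        ?_]
    · have hset : PySem.Set.add (PySem.Set.update s (rcs.map PySem.Str.strip))
          (PySem.Str.strip rp) =
          PySem.Set.update s (rcs.map PySem.Str.strip ++ [PySem.Str.strip rp]) := by
        rw [PySem.Set.update_append, PySem.Set.update_cons, PySem.Set.update_nil]
      rw [hset, ← PySem.Set.update_append]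
      simp [pvAllList, pvStripPair]
    · intro q hq
      rw [PySem.Dict.contains_insert]
      have h1 : (q.1 == PySem.Str.strip rp) = false := by
        simp only [beq_eq_false_iff_ne, ne_eq]
        intro h
        exact hfst (h ▸ List.mem_map_of_mem hq)
      rw [h1, Bool.false_or]
      exact hcon q (by simp; right; simpa using hq)

theorem pv_normLoopB_ok :
    ∀ (l : List (String × List String)) (d : PySem.Dict String (List String)),
      (∀ pr ∈ l.map pvStripPair, pr.1 ≠ "" ∧ "" ∉ pr.2 ∧ pr.1 ∉ pr.2 ∧ pr.2.Nodup) →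
      ((l.map pvStripPair).map Prod.fst).Nodup →
      (∀ pr ∈ l.map pvStripPair, d.contains pr.1 = false) →
      normLoopB l d =
        some ((l.map pvStripPair).foldl (fun d pr => d.insert pr.1 pr.2) d) := by
  intro l
  induction l with
  | nil => intro d _ _ _; simp [normLoopB]
  | cons pr rest ih =>
    obtain ⟨rp, rcs⟩ := pr
    intro d hval hnd hcon
    obtain ⟨hne, hemp, hself, hcnd⟩ := hval (pvStripPair (rp, rcs)) (by simp)
    simp only [pvStripPair] at hne hemp hself hcnd
    have hc0 : d.contains (PySem.Str.strip rp) = false :=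
      hcon (pvStripPair (rp, rcs)) (by simp)
    rw [normLoopB, if_neg hne, hc0]
    simp only [Bool.false_eq_true, if_false]
    have hany : (rcs.map PySem.Str.strip).any (fun c => c = "") = false := by
      rw [Bool.eq_false_iff]
      intro h
      obtain ⟨c, hc, hceq⟩ := List.any_eq_true.mp h
      exact hemp ((by simpa using hceq) ▸ hc)
    have hcont : (rcs.map PySem.Str.strip).contains (PySem.Str.strip rp) = false := by
      rw [Bool.eq_false_iff]
      intro h
      exact hself (by simpa using h)
    have hlen : ¬ (PySem.Set.len (PySem.Set.ofList (rcs.map PySem.Str.strip)) ≠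
        PySem.List.len (rcs.map PySem.Str.strip)) := by
      rw [PySem.Set.ofList_eq_self_of_nodup _ hcnd]
      simp [PySem.Set.len, PySem.List.len]
    rw [hany, hcont]
    simp only [Bool.false_eq_true, if_false, if_neg hlen]
    have hnd2 : (PySem.Str.strip rp :: (rest.map pvStripPair).map Prod.fst).Nodup := by
      simpa [pvStripPair] using hnd
    have hnd' := (List.nodup_cons.mp hnd2).2
    have hfst : PySem.Str.strip rp ∉ (rest.map pvStripPair).map Prod.fst :=
      (List.nodup_cons.mp hnd2).1
    rw [ih (d.insert (PySem.Str.strip rp) (rcs.map PySem.Str.strip))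
        (fun pr hpr => hval pr (by simp; right; simpa using hpr)) hnd'
        ?_]
    · simp [pvStripPair]
    · intro q hq
      rw [PySem.Dict.contains_insert]
      have h1 : (q.1 == PySem.Str.strip rp) = false := by
        simp only [beq_eq_false_iff_ne, ne_eq]
        intro h
        exact hfst (h ▸ List.mem_map_of_mem hq)
      rw [h1, Bool.false_or]
      exact hcon q (by simp; right; simpa using hq)

-- ---- the base dict, elementwise ----

theorem pv_base_eq_mk (g : List (String × List String)) (hnd : (g.map Prod.fst).Nodup) :
    pvBase g = PySem.Dict.mk g := by
  apply PySem.Dict.ext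
  have h := PySem.Dict.items_foldl_insert_fresh g (fun pr => pr.1) (fun pr => pr.2)
    PySem.Dict.empty (by intro a _; simp) (by simpa using hnd)
  simpa [pvBase] using h

-- ---- phase 2: the fill loops agree ----

theorem pv_foldl_setdefault_items (L : List String) (d : PySem.Dict String (List String))
    (hnd : L.Nodup) :
    (L.foldl (fun d n => d.setdefault n []) d).items =
      d.items ++ (L.filter (fun n => !d.contains n)).map (fun n => (n, ([] : List String))) := by
  induction L generalizing d with
  | nil => simp
  | cons n rest ih =>
    obtain ⟨hn, hnd'⟩ := List.nodup_cons.mp hnd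
    by_cases hc : d.contains n
    · rw [List.foldl_cons, PySem.Dict.setdefault_of_contains _ _ hc, ih d hnd']
      simp [hc]
    · rw [List.foldl_cons,
        PySem.Dict.setdefault_of_not_contains d [] (Bool.eq_false_iff.mpr hc),
        ih _ hnd']
      rw [PySem.Dict.items_insert_of_not_contains d [] (Bool.eq_false_iff.mpr hc)]
      have hfil : rest.filter (fun m => !(d.insert n []).contains m) =
          rest.filter (fun m => !d.contains m) := by
        apply List.filter_congr
        intro m hm
        rw [PySem.Dict.contains_insert]
        have : (m == n) = false := by
          simp only [beq_eq_false_iff_ne, ne_eq]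
          intro h; exact hn (h ▸ hm)
        rw [this, Bool.false_or]
      rw [hfil]
      simp [hc]

-- ---- acyclicity rank ----

theorem pv_children_sub (g : List (String × List String)) (x c : String)
    (hc : c ∈ pvChildren g x) : c ∈ pvNodesF g := by
  unfold pvChildren at hc
  cases hf : g.find? (fun pr => pr.1 == x) with
  | none => rw [hf] at hc; simp at hc
  | some pr =>
    rw [hf] at hc
    simp only [Option.map_some, Option.getD_some] at hc
    have hmem := List.mem_of_find?_eq_some hf
    simp only [pvNodesF, List.mem_toFinset, List.mem_flatMap]
    exact ⟨pr, hmem, List.mem_cons_of_mem _ hc⟩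

def pvRank (g : List (String × List String)) (x : String) : Nat := (pvDesc g x).card

theorem pv_expand_subset (g : List (String × List String)) (F : Finset String) :
    F ⊆ pvExpand g F := Finset.subset_union_left

theorem pv_expand_mono (g : List (String × List String)) {F F' : Finset String}
    (h : F ⊆ F') : pvExpand g F ⊆ pvExpand g F' :=
  Finset.union_subset_union h (Finset.biUnion_subset_biUnion_of_subset_left _ h)

theorem pv_expand_sub_nodes (g : List (String × List String)) {F : Finset String}
    (hF : F ⊆ pvNodesF g) : pvExpand g F ⊆ pvNodesF g := by
  refine Finset.union_subset hF ?_
  rw [Finset.biUnion_subset]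
  intro x _ c hc
  exact pv_children_sub g x c (by simpa using hc)

theorem pv_iter_sub_nodes (g : List (String × List String)) {F : Finset String}
    (hF : F ⊆ pvNodesF g) (k : Nat) : (pvExpand g)^[k] F ⊆ pvNodesF g := by
  induction k with
  | zero => simpa using hF
  | succ k ih =>
    rw [Function.iterate_succ_apply']
    exact pv_expand_sub_nodes g ih

theorem pv_iter_mono_step (g : List (String × List String)) (F : Finset String) (k : Nat) :
    (pvExpand g)^[k] F ⊆ (pvExpand g)^[k + 1] F := by
  rw [Function.iterate_succ_apply']
  exact pv_expand_subset g _

theorem pv_iter_subset_start (g : List (String × List String)) (F : Finset String) (k : Nat) :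
    F ⊆ (pvExpand g)^[k] F := by
  induction k with
  | zero => simp
  | succ k ih => exact ih.trans (pv_iter_mono_step g F k)

theorem pv_card_grow (g : List (String × List String)) (F : Finset String) :
    ∀ m : Nat, (∀ j < m, (pvExpand g)^[j] F ≠ (pvExpand g)^[j + 1] F) →
      m ≤ ((pvExpand g)^[m] F).card := by
  intro m
  induction m with
  | zero => intro _; exact Nat.zero_le _
  | succ m ih =>
    intro h
    have h1 : m ≤ ((pvExpand g)^[m] F).card := ih (fun j hj => h j (Nat.lt_succ_of_lt hj))
    have h2 : ((pvExpand g)^[m] F).card < ((pvExpand g)^[m + 1] F).card :=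
      Finset.card_lt_card (lt_of_le_of_ne (pv_iter_mono_step g F m) (h m (Nat.lt_succ_self m)))
    omega

theorem pv_iter_stab (g : List (String × List String)) {F : Finset String}
    (hF : F ⊆ pvNodesF g) :
    pvExpand g ((pvExpand g)^[(pvNodesF g).card] F) = (pvExpand g)^[(pvNodesF g).card] F := by
  set n := (pvNodesF g).card with hn
  have hex : ¬ (∀ j < n + 1, (pvExpand g)^[j] F ≠ (pvExpand g)^[j + 1] F) := by
    intro hall
    have h1 := pv_card_grow g F (n + 1) hall
    have h2 : ((pvExpand g)^[n + 1] F).card ≤ n :=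
      Finset.card_le_card (pv_iter_sub_nodes g hF (n + 1))
    omega
  simp only [not_forall, ne_eq, not_not, exists_prop] at hex
  obtain ⟨j, hj, hfix⟩ := hex
  have hfix' : pvExpand g ((pvExpand g)^[j] F) = (pvExpand g)^[j] F := by
    rw [← Function.iterate_succ_apply' (pvExpand g) j F]; exact hfix.symm
  have hnj : (pvExpand g)^[n] F = (pvExpand g)^[j] F := by
    have : n = (n - j) + j := by omega
    rw [this, Function.iterate_add_apply, Function.iterate_fixed hfix']
  rw [hnj, hfix']

theorem pv_desc_fixed (g : List (String × List String)) (x : String) :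
    pvExpand g (pvDesc g x) = pvDesc g x := by
  unfold pvDesc
  exact pv_iter_stab g (by intro c hc; exact pv_children_sub g x c (by simpa using hc))

theorem pv_children_sub_desc (g : List (String × List String)) (x : String) :
    (pvChildren g x).toFinset ⊆ pvDesc g x := pv_iter_subset_start g _ _

theorem pv_iter_sub_fixed (g : List (String × List String)) {F S : Finset String}
    (hS : S ⊆ F) (hfix : pvExpand g F = F) (k : Nat) : (pvExpand g)^[k] S ⊆ F := by
  induction k with
  | zero => simpa using hS
  | succ k ih =>
    rw [Function.iterate_succ_apply']
    calc pvExpand g ((pvExpand g)^[k] S) ⊆ pvExpand g F := pv_expand_mono g ih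
      _ = F := hfix

theorem pv_desc_sub (g : List (String × List String)) (x y : String)
    (hy : y ∈ pvChildren g x) : pvDesc g y ⊆ pvDesc g x := by
  have hyx : y ∈ pvDesc g x := pv_children_sub_desc g x (by simpa using hy)
  have hcy : (pvChildren g y).toFinset ⊆ pvDesc g x := by
    intro c hc
    have : c ∈ pvExpand g (pvDesc g x) := by
      refine Finset.mem_union_right _ ?_
      exact Finset.mem_biUnion.mpr ⟨y, hyx, hc⟩
    rwa [pv_desc_fixed] at this
  exact pv_iter_sub_fixed g hcy (pv_desc_fixed g x) _

theorem pv_rank_lt (g : List (String × List String))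
    (hacyc : ∀ x ∈ pvNodesF g, x ∉ pvDesc g x) (x y : String)
    (hy : y ∈ pvChildren g x) : pvRank g y < pvRank g x := by
  have hyn : y ∈ pvNodesF g := pv_children_sub g x y hy
  have hsub : pvDesc g y ⊆ pvDesc g x := pv_desc_sub g x y hy
  have hyx : y ∈ pvDesc g x := pv_children_sub_desc g x (by simpa using hy)
  have hyy : y ∉ pvDesc g y := hacyc y hyn
  exact Finset.card_lt_card (Finset.ssubset_iff_of_subset hsub |>.mpr ⟨y, hyx, hyy⟩)

theorem pv_rank_le (g : List (String × List String)) (x : String) :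
    pvRank g x ≤ (pvNodesF g).card :=
  Finset.card_le_card
    (pv_iter_sub_nodes g (by intro c hc; exact pv_children_sub g x c (by simpa using hc)) _)

-- ---- phase 3a: the DFS succeeds on a graph with a rank ----

theorem pv_visitA_ok (cm : PySem.Dict String (List String)) (R : String → Nat)
    (Hck : ∀ x cs, cm.get? x = some cs → ∀ c ∈ cs, (cm.get? c).isSome)
    (Hcr : ∀ x cs, cm.get? x = some cs → ∀ c ∈ cs, R c < R x) :
    ∀ (fuel : Nat) (node : String) (st : PySem.Dict String Int),
      (cm.get? node).isSome →
      (∀ x, (st.get? x).isSome = (cm.get? x).isSome) →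
      (∀ x, st.get? x = some 1 → R node < R x) →
      R node < fuel →
      ∃ st', visitA cm fuel st node = some st' ∧
        (∀ x, (st'.get? x).isSome = (cm.get? x).isSome) ∧
        (∀ x, st'.get? x = some 1 ↔ st.get? x = some 1) ∧
        st'.get? node = some 2 := by
  intro fuel
  induction fuel with
  | zero => intro node st _ _ _ hf; exact absurd hf (Nat.not_lt_zero _)
  | succ fuel ih =>
    intro node st hcm hdom hgray hf
    have hsome : (st.get? node).isSome := by rw [hdom]; exact hcm
    obtain ⟨s, hs⟩ := Option.isSome_iff_exists.mp hsome
    rw [visitA, hs]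
    simp only []
    by_cases h1 : s = 1
    · exact absurd (hgray node (h1 ▸ hs)) (lt_irrefl _)
    by_cases h2 : s = 2
    · rw [if_neg h1, if_pos h2]
      exact ⟨st, rfl, hdom, fun x => Iff.rfl, h2 ▸ hs⟩
    rw [if_neg h1, if_neg h2]
    obtain ⟨cs, hcs⟩ := Option.isSome_iff_exists.mp hcm
    rw [hcs]
    simp only []
    have hloop : ∀ (cs' : List String) (st1 : PySem.Dict String Int),
        (∀ c ∈ cs', c ∈ cs) →
        (∀ x, (st1.get? x).isSome = (cm.get? x).isSome) →
        (∀ x, st1.get? x = some 1 → R node ≤ R x) →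
        ∃ st2, visitChildrenA cm fuel st1 cs' = some st2 ∧
          (∀ x, (st2.get? x).isSome = (cm.get? x).isSome) ∧
          (∀ x, st2.get? x = some 1 ↔ st1.get? x = some 1) := by
      intro cs'
      induction cs' with
      | nil => intro st1 _ hdom1 _; exact ⟨st1, by rw [visitChildrenA], hdom1, fun x => Iff.rfl⟩
      | cons c crest ihc =>
        intro st1 hsub hdom1 hg1
        have hcc : (cm.get? c).isSome := Hck node cs hcs c (hsub c (by simp))
        have hrc : R c < R node := Hcr node cs hcs c (hsub c (by simp))
        obtain ⟨st2, he2, hdom2, hgiff2, -⟩ :=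
          ih c st1 hcc hdom1 (fun x hx => lt_of_lt_of_le hrc (hg1 x hx))
            (lt_of_lt_of_le hrc (Nat.lt_succ_iff.mp hf))
        rw [visitChildrenA, he2]
        simp only []
        obtain ⟨st3, he3, hdom3, hgiff3⟩ :=
          ihc st2 (fun q hq => hsub q (by simp [hq]))
            hdom2 (fun x hx => hg1 x ((hgiff2 x).mp hx))
        exact ⟨st3, he3, hdom3, fun x => (hgiff3 x).trans (hgiff2 x)⟩
    have hdom1 : ∀ x, ((st.insert node 1).get? x).isSome = (cm.get? x).isSome := by
      intro x
      rw [PySem.Dict.get?_insert]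
      by_cases hx : x = node
      · subst hx; simp [hcs]
      · rw [if_neg hx]; exact hdom x
    have hg1 : ∀ x, (st.insert node 1).get? x = some 1 → R node ≤ R x := by
      intro x hx
      rw [PySem.Dict.get?_insert] at hx
      by_cases hxe : x = node
      · subst hxe; exact le_refl _
      · rw [if_neg hxe] at hx
        exact le_of_lt (hgray x hx)
    obtain ⟨st2, he2, hdom2, hgiff2⟩ := hloop cs (st.insert node 1) (fun c h => h) hdom1 hg1
    rw [he2]
    refine ⟨st2.insert node 2, rfl, ?_, ?_, ?_⟩
    · intro x
      rw [PySem.Dict.get?_insert]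
      by_cases hx : x = node
      · subst hx; simp [hcs]
      · rw [if_neg hx]; exact hdom2 x
    · intro x
      rw [PySem.Dict.get?_insert]
      by_cases hx : x = node
      · subst hx
        rw [if_pos rfl]
        constructor
        · intro h; exact absurd (Option.some.inj h) (by norm_num)
        · intro h
          rw [hs] at h
          exact absurd (Option.some.inj h) h1
      · rw [if_neg hx]
        refine (hgiff2 x).trans ?_
        rw [PySem.Dict.get?_insert, if_neg hx]
    · rw [PySem.Dict.get?_insert, if_pos rfl]

theorem pv_checkLoopA_ok (cm : PySem.Dict String (List String)) (R : String → Nat)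
    (Hck : ∀ x cs, cm.get? x = some cs → ∀ c ∈ cs, (cm.get? c).isSome)
    (Hcr : ∀ x cs, cm.get? x = some cs → ∀ c ∈ cs, R c < R x) (fuel : Nat) :
    ∀ (ns : List String) (st : PySem.Dict String Int),
      (∀ n ∈ ns, (cm.get? n).isSome) →
      (∀ x, (st.get? x).isSome = (cm.get? x).isSome) →
      (∀ x, st.get? x ≠ some 1) →
      (∀ n ∈ ns, R n < fuel) →
      ∃ st', checkLoopA cm fuel ns st = some st' := by
  intro ns
  induction ns with
  | nil => intro st _ _ _ _; exact ⟨st, rfl⟩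
  | cons n rest ih =>
    intro st hns hdom hng hfu
    obtain ⟨st', he, hdom', hgiff, -⟩ :=
      pv_visitA_ok cm R Hck Hcr fuel n st (hns n (by simp)) hdom
        (fun x hx => absurd hx (hng x)) (hfu n (by simp))
    rw [checkLoopA, he]
    simp only []
    exact ih st' (fun q hq => hns q (by simp [hq])) hdom'
      (fun x hx => hng x ((hgiff x).mp hx)) (fun q hq => hfu q (by simp [hq]))

-- ---- phase 3b: the elimination loop empties on a graph with a rank ----

theorem pv_peelB_nil (cm : PySem.Dict String (List String)) (R : String → Nat)
    (Hcr : ∀ n c, c ∈ cm.getD n [] → R c < R n) :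
    ∀ (remaining : List String), peelB cm remaining = [] := by
  have key : ∀ (N : Nat) (rem : List String), rem.length ≤ N → peelB cm rem = [] := by
    intro N
    induction N with
    | zero =>
      intro rem h
      have : rem = [] := List.eq_nil_of_length_eq_zero (Nat.le_zero.mp h)
      subst this
      rw [peelB]
      simp [keepB]
    | succ N ihN =>
      intro rem hlen
      by_cases hre : rem = []
      · subst hre; rw [peelB]; simp [keepB]
      · have hminex : ∃ m ∈ rem, ∀ y ∈ rem, R m ≤ R y := by
          obtain ⟨m, hm', hmin'⟩ := Finset.exists_min_image rem.toFinset R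
            (by simpa [List.toFinset_eq_empty_iff] using hre)
          exact ⟨m, (by simpa using hm' : m ∈ rem),
            fun y hy => hmin' y (by simpa using hy)⟩
        obtain ⟨m, hm, hmin⟩ := hminex
        have hpred : ((cm.getD m []).any (fun c => rem.contains c)) = false := by
          rw [Bool.eq_false_iff]
          intro h
          obtain ⟨c, hc, hcr⟩ := List.any_eq_true.mp h
          have h1 : R c < R m := Hcr m c hc
          have h2 : R m ≤ R c := hmin c (by simpa using hcr)
          omega
        have hlt : (keepB cm rem).length < rem.length := by
          unfold keepB
          rw [List.length_filter_lt_length_iff_exists]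
          exact ⟨m, hm, by simpa using hpred⟩
        rw [peelB]
        rw [if_neg (Nat.ne_of_lt hlt)]
        exact ihN _ (by omega)
  intro remaining
  exact key remaining.length remaining (le_refl _)

-- ---- assembly ----

theorem pv_find?_of_mem (g : List (String × List String)) (pr : String × List String)
    (x : String) (hnd : (g.map Prod.fst).Nodup) (hpr : pr ∈ g) (hx : pr.1 = x) :
    g.find? (fun q => q.1 == x) = some pr := by
  induction g with
  | nil => simp at hpr
  | cons q rest ih =>
    have hnd2 : (q.1 :: rest.map Prod.fst).Nodup := by simpa using hnd
    obtain ⟨hq, hnd'⟩ := List.nodup_cons.mp hnd2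
    rcases List.mem_cons.mp hpr with h | h
    · subst h
      rw [List.find?_cons_of_pos (by simp [hx])]
    · have hqx : (q.1 == x) = false := by
        simp only [beq_eq_false_iff_ne, ne_eq]
        intro he
        exact hq (he ▸ hx ▸ List.mem_map_of_mem h)
      rw [List.find?_cons_of_neg (by simp [hqx])]
      exact ih (by simpa using hnd') h

theorem pv_foldl_insert0_get? (ns : List String) (d : PySem.Dict String Int) (x : String) :
    ((ns.foldl (fun d n => d.insert n (0 : Int)) d).get? x) =
      if x ∈ ns then some 0 else d.get? x := by
  induction ns generalizing d with
  | nil => simp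
  | cons n rest ih =>
    rw [List.foldl_cons, ih]
    by_cases hr : x ∈ rest
    · simp [hr]
    · by_cases hxn : x = n
      · subst hxn
        simp [hr, PySem.Dict.get?_insert_self]
      · simp [hr, hxn, PySem.Dict.get?_insert]

-- the nodes added by the fill phase, and the filled dict, in A's shape
def pvMissing (g : List (String × List String)) : List String :=
  (PySem.List.sorted (PySem.Set.ofList (pvAllList g)) (fun x => x) false).filter
    (fun n => !(pvBase g).contains n)

def pvNorm (g : List (String × List String)) : PySem.Dict String (List String) :=
  PySem.Dict.mk (g ++ (pvMissing g).map (fun n => (n, [])))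

theorem pv_mem_allList (g : List (String × List String)) (x : String) :
    x ∈ pvAllList g ↔ x ∈ pvNodesF g := by
  simp only [pvAllList, pvNodesF, List.mem_flatMap, List.mem_toFinset, List.mem_append,
    List.mem_cons, List.not_mem_nil, or_false]
  exact exists_congr fun a => and_congr_right fun _ => or_comm

theorem pv_base_keys (g : List (String × List String)) (hnd : (g.map Prod.fst).Nodup) :
    (pvBase g).keys = g.map Prod.fst := by
  rw [pv_base_eq_mk g hnd]; rfl

theorem pv_mem_missing (g : List (String × List String)) (hnd : (g.map Prod.fst).Nodup)
    (x : String) : x ∈ pvMissing g ↔ x ∈ pvNodesF g ∧ x ∉ g.map Prod.fst := by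
  simp only [pvMissing, List.mem_filter, PySem.List.mem_sorted, PySem.Set.mem_ofList,
    pv_mem_allList, Bool.not_eq_eq_eq_not, Bool.not_true]
  constructor
  · rintro ⟨h1, h2⟩
    refine ⟨h1, fun hx => ?_⟩
    rw [Bool.eq_false_iff] at h2
    exact h2 ((PySem.Dict.contains_iff_mem_keys _ _).mpr (by rw [pv_base_keys g hnd]; exact hx))
  · rintro ⟨h1, h2⟩
    refine ⟨h1, Bool.eq_false_iff.mpr fun hx => ?_⟩
    exact h2 (by rw [← pv_base_keys g hnd]; exact (PySem.Dict.contains_iff_mem_keys _ _).mp hx)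

theorem pv_missing_nodup (g : List (String × List String)) : (pvMissing g).Nodup :=
  List.Nodup.filter _
    ((PySem.List.sorted_perm _ _ _).nodup_iff.mpr (PySem.Set.nodup_ofList _))

theorem pv_norm_keys (g : List (String × List String)) :
    (pvNorm g).keys = g.map Prod.fst ++ pvMissing g := by
  show (g ++ (pvMissing g).map (fun n => (n, []))).map Prod.fst = _
  simp [Function.comp_def]

theorem pv_norm_keys_nodup (g : List (String × List String))
    (hnd : (g.map Prod.fst).Nodup) : (pvNorm g).keys.Nodup := by
  rw [pv_norm_keys]
  refine List.Nodup.append hnd (pv_missing_nodup g) ?_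
  intro x hx hmx
  exact ((pv_mem_missing g hnd x).mp hmx).2 hx

theorem pv_mem_norm_keys (g : List (String × List String)) (hnd : (g.map Prod.fst).Nodup)
    (x : String) : x ∈ (pvNorm g).keys ↔ x ∈ pvNodesF g := by
  rw [pv_norm_keys, List.mem_append, pv_mem_missing g hnd]
  constructor
  · rintro (h | ⟨h, -⟩)
    · obtain ⟨pr, hpr, he⟩ := List.mem_map.mp h
      simp only [pvNodesF, List.mem_toFinset, List.mem_flatMap]
      exact ⟨pr, hpr, by simp [he]⟩
    · exact h
  · intro h
    by_cases hp : x ∈ g.map Prod.fst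
    · exact Or.inl hp
    · exact Or.inr ⟨h, hp⟩

theorem pv_fillA (g : List (String × List String)) (hnd : (g.map Prod.fst).Nodup) :
    (PySem.List.sorted (PySem.Set.ofList (pvAllList g)) (fun x => x) false).foldl
      (fun d n => d.setdefault n []) (pvBase g) = pvNorm g := by
  apply PySem.Dict.ext
  rw [pv_foldl_setdefault_items _ _
    ((PySem.List.sorted_perm _ _ _).nodup_iff.mpr (PySem.Set.nodup_ofList _))]
  have hbi : (pvBase g).items = g := by rw [pv_base_eq_mk g hnd]
  rw [hbi]
  rfl

theorem pv_missing_eq_sorted_extra (g : List (String × List String))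
    (hnd : (g.map Prod.fst).Nodup) :
    pvMissing g =
      PySem.List.sorted
        (PySem.Set.diff (PySem.Set.ofList ((pvBase g).values.flatMap id)) (pvBase g).keys)
        (fun x => x) false := by
  have hvals : (pvBase g).values = g.map Prod.snd := by rw [pv_base_eq_mk g hnd]; rfl
  have hmem : ∀ x, x ∈ pvMissing g ↔
      x ∈ PySem.Set.diff (PySem.Set.ofList ((pvBase g).values.flatMap id)) (pvBase g).keys := by
    intro x
    rw [pv_mem_missing g hnd, PySem.Set.mem_diff, PySem.Set.mem_ofList, hvals,
      pv_base_keys g hnd]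
    simp only [pvNodesF, List.mem_toFinset, List.mem_flatMap, List.mem_map, id]
    constructor
    · rintro ⟨⟨pr, hpr, hx⟩, hnp⟩
      rcases List.mem_cons.mp hx with h | h
      · exact absurd ⟨pr, hpr, h.symm⟩ hnp
      · exact ⟨⟨pr.2, ⟨pr, hpr, rfl⟩, h⟩, fun ⟨pr', hpr', he⟩ => hnp ⟨pr', hpr', he⟩⟩
    · rintro ⟨⟨cs, ⟨pr, hpr, hcs⟩, hx⟩, hnp⟩
      exact ⟨⟨pr, hpr, List.mem_cons_of_mem _ (hcs ▸ hx)⟩,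
        fun ⟨pr', hpr', he⟩ => hnp ⟨pr', hpr', he⟩⟩
  have hnd1 : (pvMissing g).Nodup := pv_missing_nodup g
  have hndset : (PySem.Set.diff (PySem.Set.ofList ((pvBase g).values.flatMap id))
      (pvBase g).keys).Nodup := PySem.Set.nodup_diff _ _ (PySem.Set.nodup_ofList _)
  have hnd2 : (PySem.List.sorted
      (PySem.Set.diff (PySem.Set.ofList ((pvBase g).values.flatMap id)) (pvBase g).keys)
      (fun x => x) false).Nodup := (PySem.List.sorted_perm _ _ _).nodup_iff.mpr hndset
  have hperm : (pvMissing g).Perm (PySem.List.sorted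
      (PySem.Set.diff (PySem.Set.ofList ((pvBase g).values.flatMap id)) (pvBase g).keys)
      (fun x => x) false) := by
    rw [List.perm_ext_iff_of_nodup hnd1 hnd2]
    intro x
    rw [hmem x, PySem.List.mem_sorted]
  refine List.Perm.eq_of_pairwise (fun a b _ _ h h' => le_antisymm h h') ?_ ?_ hperm
  · exact List.Pairwise.filter _ (PySem.List.sorted_pairwise _ _)
  · exact PySem.List.sorted_pairwise _ _

theorem pv_fillB (g : List (String × List String)) (hnd : (g.map Prod.fst).Nodup) :
    (PySem.List.sorted
        (PySem.Set.diff (PySem.Set.ofList ((pvBase g).values.flatMap id)) (pvBase g).keys)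
        (fun x => x) false).foldl
      (fun d n => d.insert n []) (pvBase g) = pvNorm g := by
  apply PySem.Dict.ext
  rw [← pv_missing_eq_sorted_extra g hnd]
  have hfresh : ∀ n ∈ pvMissing g, (pvBase g).contains n = false := by
    intro n hn
    rw [Bool.eq_false_iff]
    intro hc
    exact ((pv_mem_missing g hnd n).mp hn).2
      (by rw [← pv_base_keys g hnd]; exact (PySem.Dict.contains_iff_mem_keys _ _).mp hc)
  have h := PySem.Dict.items_foldl_insert_fresh (pvMissing g) (fun n => n)
    (fun _ => ([] : List String)) (pvBase g) hfresh (by simpa using pv_missing_nodup g)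
  simp only [] at h
  rw [h, pv_base_eq_mk g hnd]
  rfl

theorem pv_norm_get? (g : List (String × List String)) (hnd : (g.map Prod.fst).Nodup)
    (x : String) :
    (pvNorm g).get? x =
      if x ∈ (pvNorm g).keys then some (pvChildren g x) else none := by
  by_cases hk : x ∈ (pvNorm g).keys
  · rw [if_pos hk]
    rcases List.mem_append.mp (by rwa [pv_norm_keys] at hk) with hp | hm
    · obtain ⟨pr, hpr, he⟩ := List.mem_map.mp hp
      have hfind : g.find? (fun q => q.1 == x) = some pr := pv_find?_of_mem g pr x hnd hpr he
      have hch : pvChildren g x = pr.2 := by rw [pvChildren, hfind]; rfl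
      refine PySem.Dict.get?_of_mem_items _ ?_ (pv_norm_keys_nodup g hnd)
      show (x, pvChildren g x) ∈ g ++ (pvMissing g).map (fun n => (n, []))
      rw [hch]
      exact List.mem_append_left _ (by rw [← he]; exact hpr)
    · have hnp : x ∉ g.map Prod.fst := ((pv_mem_missing g hnd x).mp hm).2
      have hfind : g.find? (fun q => q.1 == x) = none := by
        rw [List.find?_eq_none]
        intro pr hpr
        simp only [beq_iff_eq]
        intro he
        exact hnp (he ▸ List.mem_map_of_mem hpr)
      have hch : pvChildren g x = [] := by rw [pvChildren, hfind]; rfl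
      refine PySem.Dict.get?_of_mem_items _ ?_ (pv_norm_keys_nodup g hnd)
      show (x, pvChildren g x) ∈ g ++ (pvMissing g).map (fun n => (n, []))
      rw [hch]
      exact List.mem_append_right _ (List.mem_map_of_mem hm)
  · rw [if_neg hk]
    exact (PySem.Dict.get?_eq_none_iff_not_mem_keys _ _).mpr hk

theorem pv_coreA (dag : List (String × List String))
    (hval : ∀ pr ∈ dag.map pvStripPair, pr.1 ≠ "" ∧ "" ∉ pr.2 ∧ pr.1 ∉ pr.2 ∧ pr.2.Nodup)
    (hnd : ((dag.map pvStripPair).map Prod.fst).Nodup)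
    (hacyc : ∀ x ∈ pvNodesF (dag.map pvStripPair), x ∉ pvDesc (dag.map pvStripPair) x) :
    coreA dag = some (pvNorm (dag.map pvStripPair)).items := by
  have hA1 : normLoopA dag (PySem.Dict.empty, PySem.Set.empty) =
      some (pvBase (dag.map pvStripPair), PySem.Set.ofList (pvAllList (dag.map pvStripPair))) :=
    pv_normLoopA_ok dag PySem.Dict.empty PySem.Set.empty hval hnd
      (fun pr _ => PySem.Dict.contains_empty _)
  unfold coreA
  rw [hA1]
  simp only [pv_fillA _ hnd]
  set g := dag.map pvStripPair
  set nodes := PySem.List.sorted (pvNorm g).keys (fun x => x) false with hnodes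
  set st0 := nodes.foldl (fun d n => d.insert n (0 : Int)) PySem.Dict.empty with hst0
  have hmemn : ∀ x, x ∈ nodes ↔ x ∈ (pvNorm g).keys := by
    intro x; rw [hnodes, PySem.List.mem_sorted]
  have hget : ∀ x, (pvNorm g).get? x =
      if x ∈ (pvNorm g).keys then some (pvChildren g x) else none := pv_norm_get? g hnd
  have hsome : ∀ x, ((pvNorm g).get? x).isSome = true ↔ x ∈ (pvNorm g).keys := by
    intro x
    rw [hget x]
    by_cases h : x ∈ (pvNorm g).keys <;> simp [h]
  have hck : ∀ x cs, (pvNorm g).get? x = some cs → ∀ c ∈ cs, ((pvNorm g).get? c).isSome := by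
    intro x cs hx c hc
    rw [hget x] at hx
    by_cases h : x ∈ (pvNorm g).keys
    · rw [if_pos h] at hx
      have : c ∈ pvChildren g x := (Option.some.inj hx) ▸ hc
      rw [hsome c, pv_mem_norm_keys g hnd]
      exact pv_children_sub g x c this
    · rw [if_neg h] at hx; exact absurd hx (by simp)
  have hcr : ∀ x cs, (pvNorm g).get? x = some cs → ∀ c ∈ cs, pvRank g c < pvRank g x := by
    intro x cs hx c hc
    rw [hget x] at hx
    by_cases h : x ∈ (pvNorm g).keys
    · rw [if_pos h] at hx
      exact pv_rank_lt g hacyc x c ((Option.some.inj hx) ▸ hc)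
    · rw [if_neg h] at hx; exact absurd hx (by simp)
  have hstx : ∀ x, st0.get? x = if x ∈ nodes then some 0 else none := by
    intro x
    rw [hst0, pv_foldl_insert0_get?]
    by_cases h : x ∈ nodes <;> simp [h]
  have hcard : (pvNodesF g).card = nodes.length := by
    have hset : pvNodesF g = (pvNorm g).keys.toFinset := by
      ext x
      rw [List.mem_toFinset, pv_mem_norm_keys g hnd]
    rw [hset, List.toFinset_card_of_nodup (pv_norm_keys_nodup g hnd), hnodes,
      PySem.List.length_sorted]
  obtain ⟨stF, hstF⟩ := pv_checkLoopA_ok (pvNorm g) (pvRank g) hck hcr (nodes.length + 1)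
    nodes st0
    (fun n hn => (hsome n).mpr ((hmemn n).mp hn))
    (by
      intro x
      rw [hstx x]
      by_cases h : x ∈ nodes
      · simp [h, (hsome x).mpr ((hmemn x).mp h)]
      · have : ((pvNorm g).get? x).isSome = false := by
          rw [Bool.eq_false_iff]
          intro hs
          exact h ((hmemn x).mpr ((hsome x).mp hs))
        simp [h, this])
    (by
      intro x
      rw [hstx x]
      by_cases h : x ∈ nodes <;> simp [h])
    (fun n _ => lt_of_le_of_lt (le_trans (pv_rank_le g n) (le_of_eq hcard))
      (Nat.lt_succ_self _))
  rw [hstF]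

theorem pv_coreB (dag : List (String × List String))
    (hval : ∀ pr ∈ dag.map pvStripPair, pr.1 ≠ "" ∧ "" ∉ pr.2 ∧ pr.1 ∉ pr.2 ∧ pr.2.Nodup)
    (hnd : ((dag.map pvStripPair).map Prod.fst).Nodup)
    (hacyc : ∀ x ∈ pvNodesF (dag.map pvStripPair), x ∉ pvDesc (dag.map pvStripPair) x) :
    coreB dag = some (pvNorm (dag.map pvStripPair)).items := by
  have hB1 : normLoopB dag PySem.Dict.empty = some (pvBase (dag.map pvStripPair)) :=
    pv_normLoopB_ok dag PySem.Dict.empty hval hnd (fun pr _ => PySem.Dict.contains_empty _)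
  unfold coreB
  rw [hB1]
  simp only [pv_fillB _ hnd]
  set g := dag.map pvStripPair
  have hget : ∀ x, (pvNorm g).get? x =
      if x ∈ (pvNorm g).keys then some (pvChildren g x) else none := pv_norm_get? g hnd
  have hcr : ∀ n c, c ∈ (pvNorm g).getD n [] → pvRank g c < pvRank g n := by
    intro n c hc
    rw [PySem.Dict.getD_eq_get?_getD, hget n] at hc
    by_cases h : n ∈ (pvNorm g).keys
    · rw [if_pos h] at hc
      exact pv_rank_lt g hacyc n c (by simpa using hc)
    · rw [if_neg h] at hc
      simp at hc
  rw [pv_peelB_nil (pvNorm g) (pvRank g) hcr]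
  rfl

theorem pv_main (dag : List (String × List String))
    (hpre : Pre_normalize_child_dag_py dag) :
    normalize_child_dag_py dag = normalize_child_dag_py_alt dag := by
  obtain ⟨hval, hnd, hacyc⟩ := hpre
  have hval' : ∀ pr ∈ dag.map pvStripPair, pr.1 ≠ "" ∧ "" ∉ pr.2 ∧ pr.1 ∉ pr.2 ∧ pr.2.Nodup :=
    hval
  have hnd' : ((dag.map pvStripPair).map Prod.fst).Nodup := hnd
  have hacyc' : ∀ x ∈ pvNodesF (dag.map pvStripPair), x ∉ pvDesc (dag.map pvStripPair) x :=
    hacyc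
  unfold normalize_child_dag_py normalize_child_dag_py_alt
  rw [pv_coreA dag hval' hnd' hacyc', pv_coreB dag hval' hnd' hacyc']

-- ===== VERDICT (by name: the statement is the Claim_ definition above) =====
theorem normalize_child_dag_py_spec : Claim_equal_normalize_child_dag_py := by
  intro dag _ hpre
  exact pv_main dag hpre
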